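-- pv_equiv track=rewrite | github.com/UrFingPoor/FriendlyStaff | FriendlyStaff.py | InitGradientLoad
-- ===== SOURCE A (Python) =====
-- def InitGradientLoad(text):
--     faded = ""
--     red = 40
--     for line in text.splitlines():
--         faded += (f"\033[38;2;{red};0;220m{line}\033[0m\n")
--         if not red == 255:
--             red += 15
--             if red > 255:
--                 red = 255
--     return faded
-- ===== SOURCE B (Python) =====
-- _PALETTE = list(range(40, 255, 15))  # [40, 55, ..., 250]: the 15 non-saturated reds
--
-- def InitGradientLoad(text):
--     lines = text.splitlines()
--     head = [f"\033[38;2;{r};0;220m{l}\033[0m\n" for r, l in zip(_PALETTE, lines)]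
--     tail = [f"\033[38;2;255;0;220m{l}\033[0m\n" for l in lines[len(head):]]
--     return "".join(head) + "".join(tail)
-- ===== Notes on version B (the rewrite author's own statement) =====
-- stated objective: alternative
-- what changed: Replaces A's single stateful pass with an incremented capped red counter by a staged construction: the lines are zipped against a precomputed 15-entry red palette table for the ramp, the remaining lines are mapped with the constant saturated red 255, and the two joined stages are concatenated.
import Mathlib
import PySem

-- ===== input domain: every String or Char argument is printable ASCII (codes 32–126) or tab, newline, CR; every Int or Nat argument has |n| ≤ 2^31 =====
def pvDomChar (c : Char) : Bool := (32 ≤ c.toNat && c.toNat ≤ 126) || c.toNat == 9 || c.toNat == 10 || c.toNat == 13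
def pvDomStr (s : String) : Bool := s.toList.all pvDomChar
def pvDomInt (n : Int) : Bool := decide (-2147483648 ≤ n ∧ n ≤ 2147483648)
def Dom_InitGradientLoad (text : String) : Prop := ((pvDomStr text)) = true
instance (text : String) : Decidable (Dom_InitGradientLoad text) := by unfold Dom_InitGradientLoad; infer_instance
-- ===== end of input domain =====

-- B restructures A's stateful capped-counter pass into staged passes: a zip of the
-- lines against a precomputed 15-entry red palette, a constant-255 map of the rest,
-- and a concatenation of the two joined stages (objective: alternative).

-- ===== PORT A =====
-- loop body of A: append the colored line to faded, then bump red with the cap branches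
def pvStepA (st : List Char × Int) (line : String) : List Char × Int :=
  (st.1 ++ ("\x1b[38;2;".toList ++ PySem.Int.toChars st.2 ++ ";0;220m".toList
      ++ line.toList ++ "\x1b[0m\n".toList),
   if ¬ st.2 = 255 then (if st.2 + 15 > 255 then 255 else st.2 + 15) else st.2)

def InitGradientLoad (text : String) : String :=
  String.ofList ((PySem.Str.splitlines text).foldl pvStepA ([], 40)).1

-- ===== PORT B =====
-- the module-level palette table: list(range(40, 255, 15))
def pvPalette : List Int := [40, 55, 70, 85, 100, 115, 130, 145, 160, 175, 190, 205, 220, 235, 250]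

-- one f-string chunk of B for red value r and line l
def pvChunkB (r : Int) (l : String) : List Char :=
  "\x1b[38;2;".toList ++ PySem.Int.toChars r ++ ";0;220m".toList
    ++ l.toList ++ "\x1b[0m\n".toList

def InitGradientLoad_alt (text : String) : String :=
  let lines := PySem.Str.splitlines text
  let head := List.zipWith pvChunkB pvPalette lines
  let tail := (lines.drop head.length).map (pvChunkB 255)
  String.ofList (head.flatten ++ tail.flatten)

-- ===== PRECONDITION & SPEC =====
def Spec_InitGradientLoad (text : String) (out : String) : Prop := out = InitGradientLoad_alt text
instance (text : String) (out : String) : Decidable (Spec_InitGradientLoad text out) := by unfold Spec_InitGradientLoad; infer_instance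

-- ===== CLAIM (what is proved, stated in full; the proofs are below) =====
def Claim_equal_InitGradientLoad : Prop := ∀ (text : String), Dom_InitGradientLoad text → Spec_InitGradientLoad text (InitGradientLoad text)

-- ===== LEMMAS AND PROOFS =====
-- A's red transition applied to the head of a palette suffix yields the head of its tail
lemma pv_step_pal : ∀ pal ∈ pvPalette.tails,
    (if ¬ pal.headD 255 = 255 then
        (if pal.headD 255 + 15 > 255 then (255 : Int) else pal.headD 255 + 15)
      else pal.headD 255) = pal.tail.headD 255 := by decide

lemma pv_tail_pal : ∀ pal ∈ pvPalette.tails, pal.tail ∈ pvPalette.tails := by decide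

-- invariant: from red = head of a palette suffix, A's fold produces B's head ++ tail chunks
lemma pv_loop (ls : List String) : ∀ pal ∈ pvPalette.tails, ∀ (acc : List Char),
    (ls.foldl pvStepA (acc, pal.headD 255)).1
      = acc ++ (List.zipWith pvChunkB pal ls).flatten
          ++ ((ls.drop (List.zipWith pvChunkB pal ls).length).map (pvChunkB 255)).flatten := by
  induction ls with
  | nil => intro pal _ acc; simp
  | cons l t ih =>
    intro pal hpal acc
    cases pal with
    | nil =>
      have h := ih [] hpal (acc ++ pvChunkB 255 l)
      simp only [List.foldl_cons, pvStepA, List.headD_nil] at h ⊢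
      simpa [pvChunkB, List.append_assoc, List.headD] using h
    | cons r rest =>
      have hstep := pv_step_pal (r :: rest) hpal
      have hrest := pv_tail_pal (r :: rest) hpal
      simp only [List.headD_cons] at hstep
      simp only [List.foldl_cons, pvStepA, List.headD_cons, List.tail_cons] at hstep ⊢
      rw [hstep]
      have h := ih rest hrest (acc ++ pvChunkB r l)
      simpa [pvChunkB, List.append_assoc, List.headD] using h

-- ===== VERDICT (by name: the statement is the Claim_ definition above) =====
theorem InitGradientLoad_spec : Claim_equal_InitGradientLoad := by
  intro text _
  unfold Spec_InitGradientLoad InitGradientLoad InitGradientLoad_alt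
  have h := pv_loop (PySem.Str.splitlines text) pvPalette (by simp) []
  simp only [show (pvPalette.headD 255) = 40 from rfl] at h
  simp [h]
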